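-- pv_equiv track=rewrite | github.com/radna0/cuda-norm | cpu_select_reasoning_ids_from_prompt_embeddings.py | _len_bucket
-- ===== SOURCE A (Python) =====
-- def _len_bucket(tok: int, edges: list[int]) -> int:
--     # edges define half-open buckets [edges[i], edges[i+1]) for i in [0..n-2]
--     t = int(tok)
--     if t < 0:
--         t = 0
--     # edges are small (<= ~1025); linear scan is fine.
--     for i in range(len(edges) - 1):
--         if edges[i] <= t < edges[i + 1]:
--             return i
--     return len(edges) - 2
-- ===== SOURCE B (Python) =====
-- from bisect import bisect_right
--
-- def _len_bucket(tok: int, edges: list[int]) -> int: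
--     t = tok if tok >= 0 else 0
--     idx = bisect_right(edges, t) - 1
--     if 0 <= idx <= len(edges) - 2:
--         return idx
--     return len(edges) - 2
-- ===== Notes on version B (the rewrite author's own statement) =====
-- stated objective: faster
-- what changed: Replaced the linear scan over bucket edges by a binary search (bisect_right) with the same clamp and the same default-to-last-bucket fallback.
-- outside the precondition, e.g. on _len_bucket(5, [0, 10, 2, 20]): A returns 0, B returns 2
import Mathlib
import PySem

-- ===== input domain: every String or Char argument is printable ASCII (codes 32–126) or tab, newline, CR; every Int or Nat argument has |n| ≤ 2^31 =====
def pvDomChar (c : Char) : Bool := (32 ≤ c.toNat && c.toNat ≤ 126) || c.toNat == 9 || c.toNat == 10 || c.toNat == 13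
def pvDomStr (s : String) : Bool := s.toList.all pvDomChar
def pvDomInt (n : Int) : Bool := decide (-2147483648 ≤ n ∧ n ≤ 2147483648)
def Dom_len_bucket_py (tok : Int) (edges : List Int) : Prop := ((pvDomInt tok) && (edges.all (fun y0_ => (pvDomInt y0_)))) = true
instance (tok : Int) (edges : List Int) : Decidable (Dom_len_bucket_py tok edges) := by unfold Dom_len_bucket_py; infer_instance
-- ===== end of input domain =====

-- B replaces A's linear scan over the sorted bucket edges by a binary search (bisect_right): faster.


-- ===== PORT A =====
-- the 'for i in range(len(edges)-1): if edges[i] <= t < edges[i+1]: return i' loop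
-- (indices i and i+1 are always in range there, so getD is exact)
def lenBucketScan (t : Int) (edges : List Int) : List Nat → Option Nat
  | [] => none
  | i :: rest =>
      if edges.getD i 0 ≤ t ∧ t < edges.getD (i + 1) 0 then some i
      else lenBucketScan t edges rest

def len_bucket_py (tok : Int) (edges : List Int) : Int :=
  let t : Int := if tok < 0 then 0 else tok
  match lenBucketScan t edges (List.range (edges.length - 1)) with
  | some i => (i : Int)
  | none => (edges.length : Int) - 2

-- ===== PORT B =====
-- transliteration of bisect.bisect_right's binary search (lo = 0, hi = len(edges))
def bisectGo (edges : List Int) (t : Int) (lo hi : Nat) : Nat :=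
  if _h : lo < hi then
    let mid := (lo + hi) / 2
    if t < edges.getD mid 0 then bisectGo edges t lo mid
    else bisectGo edges t (mid + 1) hi
  else lo
termination_by hi - lo
decreasing_by all_goals omega

def len_bucket_py_alt (tok : Int) (edges : List Int) : Int :=
  let t : Int := if 0 ≤ tok then tok else 0
  let idx : Int := (bisectGo edges t 0 edges.length : Int) - 1
  if 0 ≤ idx ∧ idx ≤ (edges.length : Int) - 2 then idx
  else (edges.length : Int) - 2

-- ===== PRECONDITION & SPEC =====
-- Pre_ excludes unsorted edge lists of length ≥ 3 whose value range strictly straddles the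
-- clamped token: there the contract ("edges define half-open buckets [edges[i], edges[i+1])",
-- which presupposes non-decreasing edges) is violated and A's first-match scan gives
-- accidental answers a binary search need not match; everywhere else the two agree.
def Pre_len_bucket_py (tok : Int) (edges : List Int) : Prop :=
  List.IsChain (· ≤ ·) edges ∨ edges.length ≤ 2 ∨
  (∀ e ∈ edges, e ≤ max tok 0) ∨ (∀ e ∈ edges, max tok 0 < e)
instance (tok : Int) (edges : List Int) : Decidable (Pre_len_bucket_py tok edges) := by
  unfold Pre_len_bucket_py; infer_instance

def pvWitness_len_bucket_py : Int × List Int := (5, [0, 10, 20])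

def Spec_len_bucket_py (tok : Int) (edges : List Int) (out : Int) : Prop := out = len_bucket_py_alt tok edges
instance (tok : Int) (edges : List Int) (out : Int) : Decidable (Spec_len_bucket_py tok edges out) := by unfold Spec_len_bucket_py; infer_instance

-- ===== CLAIM (what is proved, stated in full; the proofs are below) =====
def Claim_equal_len_bucket_py : Prop := ∀ (tok : Int) (edges : List Int), Dom_len_bucket_py tok edges → Pre_len_bucket_py tok edges → Spec_len_bucket_py tok edges (len_bucket_py tok edges)

-- ===== LEMMAS AND PROOFS =====

-- monotone access derived from sortedness
theorem edges_mono {edges : List Int} (h : List.IsChain (· ≤ ·) edges)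
    {i j : Nat} (hij : i ≤ j) (hj : j < edges.length) :
    edges.getD i 0 ≤ edges.getD j 0 := by
  rcases Nat.eq_or_lt_of_le hij with rfl | hlt
  · exact le_refl _
  · have hp : List.Pairwise (· ≤ ·) edges := List.isChain_iff_pairwise.1 h
    have := (List.pairwise_iff_getElem (R := (· ≤ ·)) (l := edges)).1 hp i j
      (lt_trans hlt hj) hj hlt
    rw [List.getD_eq_getElem _ _ (lt_trans hlt hj), List.getD_eq_getElem _ _ hj]
    exact this

-- binary-search invariant: bisectGo returns the insertion point
theorem bisectGo_spec (edges : List Int) (t : Int)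
    (hs : List.IsChain (· ≤ ·) edges) :
    ∀ lo hi : Nat, hi ≤ edges.length →
    lo ≤ hi →
    (∀ j, j < lo → edges.getD j 0 ≤ t) →
    (∀ j, hi ≤ j → j < edges.length → t < edges.getD j 0) →
    lo ≤ bisectGo edges t lo hi ∧ bisectGo edges t lo hi ≤ hi ∧
    (∀ j, j < bisectGo edges t lo hi → edges.getD j 0 ≤ t) ∧
    (∀ j, bisectGo edges t lo hi ≤ j → j < edges.length → t < edges.getD j 0) := by
  intro lo hi
  induction lo, hi using bisectGo.induct (edges := edges) (t := t) with
  | case1 lo hi h mid hlt ih =>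
    intro hhi hlohi hbelow habove
    rw [bisectGo]
    simp only [dif_pos h]
    have hmid : mid < hi := by omega
    simp only [show (lo + hi) / 2 = mid from rfl, if_pos hlt]
    have habove' : ∀ j, mid ≤ j → j < edges.length → t < edges.getD j 0 := by
      intro j hj hjn
      exact lt_of_lt_of_le hlt (edges_mono hs hj hjn)
    have := ih (by omega) (by omega) hbelow habove'
    exact ⟨this.1, by omega, this.2.2.1, this.2.2.2⟩
  | case2 lo hi h mid hge ih =>
    intro hhi hlohi hbelow habove
    rw [bisectGo]
    simp only [dif_pos h]
    have hmid : mid < hi := by omega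
    simp only [show (lo + hi) / 2 = mid from rfl, if_neg hge]
    have hbelow' : ∀ j, j < mid + 1 → edges.getD j 0 ≤ t := by
      intro j hj
      have : edges.getD j 0 ≤ edges.getD mid 0 :=
        edges_mono hs (by omega) (by omega)
      omega
    have := ih (by omega) (by omega) hbelow' habove
    exact ⟨by omega, this.2.1, this.2.2.1, this.2.2.2⟩
  | case3 lo hi h =>
    intro hhi hlohi hbelow habove
    rw [bisectGo]
    simp only [dif_neg h]
    exact ⟨le_refl _, hlohi, hbelow, fun j hj hjn => habove j (by omega) hjn⟩

-- A's scan on a list none of whose indices match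
theorem scan_none (t : Int) (edges : List Int) (l : List Nat)
    (h : ∀ i ∈ l, ¬(edges.getD i 0 ≤ t ∧ t < edges.getD (i + 1) 0)) :
    lenBucketScan t edges l = none := by
  induction l with
  | nil => rfl
  | cons i rest ih =>
    rw [lenBucketScan]
    rw [if_neg (h i (List.mem_cons_self))]
    exact ih (fun j hj => h j (List.mem_cons_of_mem _ hj))

theorem scan_append (t : Int) (edges : List Int) (l1 l2 : List Nat)
    (h1 : lenBucketScan t edges l1 = none) :
    lenBucketScan t edges (l1 ++ l2) = lenBucketScan t edges l2 := by
  induction l1 with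
  | nil => rfl
  | cons i rest ih =>
    rw [List.cons_append]
    rw [lenBucketScan] at h1 ⊢
    by_cases hc : edges.getD i 0 ≤ t ∧ t < edges.getD (i + 1) 0
    · rw [if_pos hc] at h1; exact absurd h1 (by simp)
    · rw [if_neg hc] at h1 ⊢
      exact ih h1

-- A's scan finds the first matching index
theorem scan_range_first (t : Int) (edges : List Int) (m k : Nat) (hk : k < m)
    (hp : edges.getD k 0 ≤ t ∧ t < edges.getD (k + 1) 0)
    (hmin : ∀ j, j < k → ¬(edges.getD j 0 ≤ t ∧ t < edges.getD (j + 1) 0)) :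
    lenBucketScan t edges (List.range m) = some k := by
  have hsplit : List.range m = List.range k ++ List.map (k + ·) (List.range (m - k)) := by
    rw [← List.range_add]
    congr 1
    omega
  rw [hsplit]
  rw [scan_append _ _ _ _ (scan_none _ _ _ (by
    intro i hi
    exact hmin i (List.mem_range.1 hi)))]
  have hmk : m - k = (m - k - 1) + 1 := by omega
  rw [hmk, List.range_succ_eq_map]
  simp only [List.map_cons]
  rw [lenBucketScan]
  rw [if_pos (by simpa using hp)]
  simp

-- bisectGo stays between lo and hi (no sortedness needed)
theorem bisect_bounds (edges : List Int) (t : Int) :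
    ∀ lo hi : Nat, lo ≤ hi →
    lo ≤ bisectGo edges t lo hi ∧ bisectGo edges t lo hi ≤ hi := by
  intro lo hi
  induction lo, hi using bisectGo.induct (edges := edges) (t := t) with
  | case1 lo hi h mid hlt ih =>
    intro _
    rw [bisectGo]; simp only [dif_pos h, show (lo + hi) / 2 = mid from rfl, if_pos hlt]
    have := ih (by omega)
    omega
  | case2 lo hi h mid hge ih =>
    intro _
    rw [bisectGo]; simp only [dif_pos h, show (lo + hi) / 2 = mid from rfl, if_neg hge]
    have := ih (by omega)
    omega
  | case3 lo hi h =>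
    intro hle
    rw [bisectGo]; simp only [dif_neg h]
    omega

-- when every edge is ≤ t the search runs to the right end
theorem bisect_all_le (edges : List Int) (t : Int)
    (hall : ∀ j, j < edges.length → edges.getD j 0 ≤ t) :
    ∀ lo hi : Nat, hi ≤ edges.length → lo ≤ hi → bisectGo edges t lo hi = hi := by
  intro lo hi
  induction lo, hi using bisectGo.induct (edges := edges) (t := t) with
  | case1 lo hi h mid hlt ih =>
    intro hhi _
    exact absurd (hall mid (by omega)) (by omega)
  | case2 lo hi h mid hge ih =>
    intro hhi _
    rw [bisectGo]; simp only [dif_pos h, show (lo + hi) / 2 = mid from rfl, if_neg hge]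
    exact ih hhi (by omega)
  | case3 lo hi h =>
    intro _ hle
    rw [bisectGo]; simp only [dif_neg h]
    omega

-- when every edge is > t the search stays at the left end
theorem bisect_all_gt (edges : List Int) (t : Int)
    (hall : ∀ j, j < edges.length → t < edges.getD j 0) :
    ∀ lo hi : Nat, hi ≤ edges.length → bisectGo edges t lo hi = lo := by
  intro lo hi
  induction lo, hi using bisectGo.induct (edges := edges) (t := t) with
  | case1 lo hi h mid hlt ih =>
    intro hhi
    rw [bisectGo]; simp only [dif_pos h, show (lo + hi) / 2 = mid from rfl, if_pos hlt]
    exact ih (by omega)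
  | case2 lo hi h mid hge ih =>
    intro hhi
    exact absurd (hall mid (by omega)) (by omega)
  | case3 lo hi h =>
    intro _
    rw [bisectGo]; simp only [dif_neg h]

-- getD at an in-range index is a member of the list
theorem getD_mem {edges : List Int} {j : Nat} (hj : j < edges.length) :
    edges.getD j 0 ∈ edges := by
  rw [List.getD_eq_getElem _ _ hj]
  exact List.getElem_mem hj

-- the two ports agree on lists of at most one bucket: both give the default
theorem core_short (edges : List Int) (t : Int) (hlen : edges.length ≤ 2) :
    (match lenBucketScan t edges (List.range (edges.length - 1)) with
      | some i => (i : Int)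
      | none => (edges.length : Int) - 2)
    = (if 0 ≤ (bisectGo edges t 0 edges.length : Int) - 1 ∧
          (bisectGo edges t 0 edges.length : Int) - 1 ≤ (edges.length : Int) - 2
        then (bisectGo edges t 0 edges.length : Int) - 1
        else (edges.length : Int) - 2) := by
  have hb := bisect_bounds edges t 0 edges.length (Nat.zero_le _)
  by_cases h2 : edges.length = 2
  · -- exactly one bucket: both sides return 0 whatever happens
    have hA : (match lenBucketScan t edges (List.range (edges.length - 1)) with
        | some i => (i : Int)
        | none => (edges.length : Int) - 2) = 0 := by
      rw [h2]
      rw [show List.range (2 - 1) = [0] from rfl]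
      rw [lenBucketScan]
      by_cases hc : edges.getD 0 0 ≤ t ∧ t < edges.getD (0 + 1) 0
      · rw [if_pos hc]; rfl
      · rw [if_neg hc]; rfl
    rw [hA, h2] at *
    split_ifs with h
    · omega
    · omega
  · -- zero or one edge: no bucket exists, both give the default
    have hn1 : edges.length - 1 = 0 := by omega
    rw [hn1, show List.range 0 = ([] : List Nat) from rfl]
    rw [show lenBucketScan t edges [] = none from rfl]
    rw [if_neg (by omega)]

-- the two ports agree for any clamped token value once edges are sorted
theorem core_sorted (edges : List Int) (t : Int) (hpre : List.IsChain (· ≤ ·) edges) :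
    (match lenBucketScan t edges (List.range (edges.length - 1)) with
      | some i => (i : Int)
      | none => (edges.length : Int) - 2)
    = (if 0 ≤ (bisectGo edges t 0 edges.length : Int) - 1 ∧
          (bisectGo edges t 0 edges.length : Int) - 1 ≤ (edges.length : Int) - 2
        then (bisectGo edges t 0 edges.length : Int) - 1
        else (edges.length : Int) - 2) := by
  have hspec := bisectGo_spec edges t hpre 0 edges.length (le_refl _) (Nat.zero_le _)
    (fun j hj => absurd hj (Nat.not_lt_zero _))
    (fun j hj hjn => absurd (lt_of_le_of_lt hj hjn) (lt_irrefl _))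
  obtain ⟨-, hrn, hbelow, habove⟩ := hspec
  generalize hr : bisectGo edges t 0 edges.length = r at *
  by_cases hcase : 1 ≤ r ∧ r ≤ edges.length - 1 ∧ 2 ≤ edges.length
  · -- idx = r - 1 is a valid bucket; A's scan finds it first
    obtain ⟨h1, h2, h3⟩ := hcase
    have hscan : lenBucketScan t edges (List.range (edges.length - 1)) = some (r - 1) := by
      apply scan_range_first _ _ _ _ (by omega)
      · refine ⟨hbelow (r - 1) (by omega), ?_⟩
        have := habove r (le_refl _) (by omega)
        have hr1 : r - 1 + 1 = r := by omega
        rw [hr1]; exact this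
      · intro j hj hP
        have : edges.getD (j + 1) 0 ≤ t := hbelow (j + 1) (by omega)
        omega
    rw [hscan]
    rw [if_pos (by constructor <;> omega)]
    show ((r - 1 : Nat) : Int) = (r : Int) - 1
    omega
  · -- default bucket on both sides: no index matches A's scan, B's idx is out of range
    have hnone : lenBucketScan t edges (List.range (edges.length - 1)) = none := by
      apply scan_none
      intro i hi hP
      have hi' : i < edges.length - 1 := List.mem_range.1 hi
      by_cases hr0 : r = 0
      · have := habove i (by omega) (by omega)
        omega
      · have hrn' : r = edges.length := by omega
        have : edges.getD (i + 1) 0 ≤ t := hbelow (i + 1) (by omega)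
        omega
    rw [hnone]
    rw [if_neg (by omega)]

-- the two ports agree for any clamped token value on Pre_'s inputs
theorem core (edges : List Int) (t : Int)
    (hpre : List.IsChain (· ≤ ·) edges ∨ edges.length ≤ 2 ∨
      (∀ e ∈ edges, e ≤ t) ∨ (∀ e ∈ edges, t < e)) :
    (match lenBucketScan t edges (List.range (edges.length - 1)) with
      | some i => (i : Int)
      | none => (edges.length : Int) - 2)
    = (if 0 ≤ (bisectGo edges t 0 edges.length : Int) - 1 ∧
          (bisectGo edges t 0 edges.length : Int) - 1 ≤ (edges.length : Int) - 2
        then (bisectGo edges t 0 edges.length : Int) - 1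
        else (edges.length : Int) - 2) := by
  rcases hpre with hpre | hlen | hle | hgt
  · exact core_sorted edges t hpre
  · exact core_short edges t hlen
  · -- every edge ≤ t: both sides fall through to the default bucket
    have hall : ∀ j, j < edges.length → edges.getD j 0 ≤ t :=
      fun j hj => hle _ (getD_mem hj)
    rw [bisect_all_le edges t hall 0 edges.length (le_refl _) (Nat.zero_le _)]
    rw [scan_none _ _ _ (by
      intro i hi hP
      have hi' : i < edges.length - 1 := List.mem_range.1 hi
      have := hall (i + 1) (by omega)
      omega)]
    rw [if_neg (by omega)]
  · -- every edge > t: both sides fall through to the default bucket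
    have hall : ∀ j, j < edges.length → t < edges.getD j 0 :=
      fun j hj => hgt _ (getD_mem hj)
    rw [bisect_all_gt edges t hall 0 edges.length (le_refl _)]
    rw [scan_none _ _ _ (by
      intro i hi hP
      have hi' : i < edges.length - 1 := List.mem_range.1 hi
      have := hall i (by omega)
      omega)]
    rw [if_neg (by omega)]
-- ===== VERDICT (by name: the statement is the Claim_ definition above) =====
theorem len_bucket_py_spec : Claim_equal_len_bucket_py := by
  intro tok edges _hdom hpre
  unfold Spec_len_bucket_py
  simp only [len_bucket_py, len_bucket_py_alt]
  rw [show (if tok < 0 then (0 : Int) else tok) = (if 0 ≤ tok then tok else 0) by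
    split_ifs <;> omega]
  apply core
  unfold Pre_len_bucket_py at hpre
  rw [show max tok 0 = (if 0 ≤ tok then tok else 0) by split_ifs <;> omega] at hpre
  exact hpre
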